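-- pv_equiv track=rewrite | github.com/RoiGerber/Navy-scheduler | Project Files/Rules.py | NotMoreThan3DaysDynamic
-- ===== SOURCE A (Python) =====
-- def NotMoreThan3DaysDynamic(Day,HowToAllocate,Info,History):
--     if len(History) < 2:
--         return True
--     elif len(History) > 5:
--         return True
--     else:
--         for Ship in HowToAllocate[:4]:
--             DayInARow = 0
--             for HistoryDay in History[-2:]:
--                 if Ship in HistoryDay[:4]:
--                     DayInARow += 1
--                     if DayInARow > 1:
--                         return False
--     return True
-- ===== SOURCE B (Python) =====
-- def NotMoreThan3DaysDynamic(Day, HowToAllocate, Info, History):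
--     if len(History) < 2 or len(History) > 5:
--         return True
--     counts = {}
--     for day in History[-2:]:
--         for ship in dict.fromkeys(day[:4]):
--             counts[ship] = counts.get(ship, 0) + 1
--     return all(counts.get(ship, 0) < 2 for ship in HowToAllocate[:4])
-- ===== Notes on version B (the rewrite author's own statement) =====
-- stated objective: alternative
-- what changed: Inverts the loop structure: instead of scanning the two trailing days per candidate ship with a counter and early return, B makes one pass over the trailing days building a frequency dictionary (ships deduped within each day), then a single all() pass over the candidates checks no ship's count reaches 2.
import Mathlib
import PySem

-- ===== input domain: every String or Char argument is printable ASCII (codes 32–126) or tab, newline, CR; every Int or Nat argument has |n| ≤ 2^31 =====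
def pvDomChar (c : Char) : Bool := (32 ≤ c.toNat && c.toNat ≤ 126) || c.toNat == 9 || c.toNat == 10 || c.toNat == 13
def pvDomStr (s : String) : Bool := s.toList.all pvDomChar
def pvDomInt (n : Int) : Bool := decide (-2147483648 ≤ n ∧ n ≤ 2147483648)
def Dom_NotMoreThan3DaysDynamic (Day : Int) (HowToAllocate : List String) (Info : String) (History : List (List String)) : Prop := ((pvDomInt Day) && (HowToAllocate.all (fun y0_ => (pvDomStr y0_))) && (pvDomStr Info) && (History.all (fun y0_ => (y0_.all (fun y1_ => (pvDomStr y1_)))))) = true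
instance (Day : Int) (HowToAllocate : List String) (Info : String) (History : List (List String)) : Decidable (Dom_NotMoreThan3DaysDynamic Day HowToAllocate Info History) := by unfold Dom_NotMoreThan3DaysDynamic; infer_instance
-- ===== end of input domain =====

-- B inverts A's loops: one pass over the two trailing days builds a frequency dict
-- (ships deduped within a day), then a single all() pass over candidates (alternative).

-- ===== PORT A =====
-- inner 'for HistoryDay in History[-2:]' loop with the DayInARow counter;
-- returns false exactly when the Python body hits 'return False'
def pvAInner (ship : String) (days : List (List String)) (cnt : Int) : Bool :=
  match days with
  | [] => true
  | d :: rest =>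
    if ship ∈ PySem.List.slice d none (some 4) then
      if cnt + 1 > 1 then false else pvAInner ship rest (cnt + 1)
    else pvAInner ship rest cnt

-- outer 'for Ship in HowToAllocate[:4]' loop
def pvALoop (ships : List String) (last2 : List (List String)) : Bool :=
  match ships with
  | [] => true
  | s :: rest => if pvAInner s last2 0 then pvALoop rest last2 else false

def NotMoreThan3DaysDynamic (Day : Int) (HowToAllocate : List String) (Info : String) (History : List (List String)) : Bool :=
  if History.length < 2 then true
  else if History.length > 5 then true
  else pvALoop (PySem.List.slice HowToAllocate none (some 4)) (PySem.List.slice History (some (-2)) none)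

-- ===== PORT B =====
def NotMoreThan3DaysDynamic_alt (Day : Int) (HowToAllocate : List String) (Info : String) (History : List (List String)) : Bool :=
  if History.length < 2 || History.length > 5 then true
  else
    let counts : PySem.Dict String Int :=
      (PySem.List.slice History (some (-2)) none).foldl
        (fun d day =>
          (PySem.List.dedup (PySem.List.slice day none (some 4))).foldl
            (fun d ship => d.insert ship (d.getD ship 0 + 1)) d)
        PySem.Dict.empty
    (PySem.List.slice HowToAllocate none (some 4)).all (fun ship => counts.getD ship 0 < 2)

-- ===== PRECONDITION & SPEC =====
def Spec_NotMoreThan3DaysDynamic (Day : Int) (HowToAllocate : List String) (Info : String) (History : List (List String)) (out : Bool) : Prop := out = NotMoreThan3DaysDynamic_alt Day HowToAllocate Info History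
instance (Day : Int) (HowToAllocate : List String) (Info : String) (History : List (List String)) (out : Bool) : Decidable (Spec_NotMoreThan3DaysDynamic Day HowToAllocate Info History out) := by unfold Spec_NotMoreThan3DaysDynamic; infer_instance

-- ===== CLAIM =====
def Claim_equal_NotMoreThan3DaysDynamic : Prop := ∀ (Day : Int) (HowToAllocate : List String) (Info : String) (History : List (List String)), Dom_NotMoreThan3DaysDynamic Day HowToAllocate Info History → Spec_NotMoreThan3DaysDynamic Day HowToAllocate Info History (NotMoreThan3DaysDynamic Day HowToAllocate Info History)

-- ===== LEMMAS AND PROOFS =====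

-- A's inner loop over exactly two days decides "present in both"
theorem pvAInner_two (s : String) (d1 d2 : List String) :
    pvAInner s [d1, d2] 0 =
      !(decide (s ∈ PySem.List.slice d1 none (some 4)) &&
        decide (s ∈ PySem.List.slice d2 none (some 4))) := by
  simp [pvAInner]

-- A's outer loop is "no ship is in both trailing days"
theorem pvALoop_eq_any (ships : List String) (d1 d2 : List String) :
    pvALoop ships [d1, d2] =
      !(ships.any fun s =>
          decide (s ∈ PySem.List.slice d1 none (some 4)) &&
          decide (s ∈ PySem.List.slice d2 none (some 4))) := by
  induction ships with
  | nil => simp [pvALoop]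
  | cons s rest ih =>
    simp only [pvALoop, pvAInner_two, List.any_cons, ih]
    by_cases h1 : s ∈ PySem.List.slice d1 none (some 4) <;>
      by_cases h2 : s ∈ PySem.List.slice d2 none (some 4) <;> simp [h1, h2]

-- the last two elements of a list of length ≥ 2, as a two-element list
theorem drop_len_sub_two {α : Type} (xs : List α) (h : 2 ≤ xs.length) :
    xs.drop (xs.length - 2) =
      [xs[xs.length - 2]'(by omega), xs[xs.length - 1]'(by omega)] := by
  apply List.ext_getElem
  · simp; omega
  · intro i hi hlen
    have hi2 : i < 2 := by simpa using hlen
    rw [List.getElem_drop]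
    interval_cases i <;> simp <;> congr 1 <;> omega

-- count in a deduped list is 0/1 by membership
theorem count_dedup {α : Type} [DecidableEq α] [BEq α] [LawfulBEq α] (xs : List α) (s : α) :
    (PySem.Set.ofList xs).count s = if s ∈ xs then 1 else 0 := by
  by_cases h : s ∈ xs
  · simp only [h, if_true]
    exact List.count_eq_one_of_mem (PySem.Set.nodup_ofList xs)
      (by simpa [PySem.Set.mem_ofList] using h)
  · simp [List.count_eq_zero, PySem.Set.mem_ofList, h]

-- the value B's dict holds at s, for the two trailing days
theorem counts_getD (d1 d2 : List String) (s : String) :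
    (([d1, d2] : List (List String)).foldl
        (fun d day =>
          (PySem.List.dedup (PySem.List.slice day none (some 4))).foldl
            (fun d ship => d.insert ship (d.getD ship 0 + 1)) d)
        PySem.Dict.empty).getD s 0 =
      (if s ∈ PySem.List.slice d1 none (some 4) then (1 : Int) else 0) +
      (if s ∈ PySem.List.slice d2 none (some 4) then 1 else 0) := by
  simp [List.foldl, PySem.Dict.getD_foldl_insert_add_one, count_dedup]

-- ===== VERDICT =====
theorem NotMoreThan3DaysDynamic_spec : Claim_equal_NotMoreThan3DaysDynamic := by
  intro Day HowToAllocate Info History _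
  unfold Spec_NotMoreThan3DaysDynamic NotMoreThan3DaysDynamic NotMoreThan3DaysDynamic_alt
  by_cases hlt : History.length < 2
  · simp [hlt]
  · by_cases hgt : History.length > 5
    · simp [hlt, hgt]
    · simp only [hlt, hgt, if_false, Bool.or_eq_true, decide_eq_true_eq]
      have h2 : 2 ≤ History.length := by omega
      rw [PySem.List.slice_from_neg_ofNat History 2 (by omega)]
      rw [drop_len_sub_two History h2]
      rw [pvALoop_eq_any]
      rw [List.all_eq_not_any_not]
      refine congrArg not (List.any_congr rfl fun s => ?_)
      rw [counts_getD]
      by_cases h1 : s ∈ PySem.List.slice (History[History.length - 2]'(by omega)) none (some 4) <;>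
        by_cases h2' : s ∈ PySem.List.slice (History[History.length - 1]'(by omega)) none (some 4) <;>
          simp [h1, h2']
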